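-- pv_equiv track=rewrite | github.com/unipv-larl/udeasy | python_scripts/optional.py | get_queries_list
-- ===== SOURCE A (Python) =====
-- import itertools
--
-- def get_queries_list(core_q, optional):
--     """
--     from the set of core nodes (non optional) and the set of optional nodes, this function creates all the sets of possible combinations
--     the core nodes will be present in all the combinations
--     """
--     qlist = []
--     for i in range(1, len(optional) + 1):
--         for c in itertools.combinations(optional, i):
--             q = core_q.copy()
--             for n in c:
--                 q[n] = optional[n]
--             qlist.append(q)
--     return sorted(qlist, key=len, reverse=True)
-- ===== SOURCE B (Python) =====
-- def _combos(xs, r):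
--     """all r-element sublists of xs, in lexicographic (index) order"""
--     if r == 0:
--         return [[]]
--     if not xs:
--         return []
--     first, rest = xs[0], xs[1:]
--     return [[first] + c for c in _combos(rest, r - 1)] + _combos(rest, r)
--
--
-- def get_queries_list(core_q, optional):
--     keys = list(optional)
--     buckets = {}
--     for r in range(1, len(keys) + 1):
--         for ks in _combos(keys, r):
--             q = dict(core_q)
--             q.update((k, optional[k]) for k in ks)
--             buckets.setdefault(len(q), []).append(q)
--     out = []
--     for size in sorted(buckets, reverse=True):
--         out += buckets[size]
--     return out
-- ===== Notes on version B (the rewrite author's own statement) =====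
-- stated objective: alternative
-- what changed: B replaces A's itertools.combinations plus final comparison sort (sorted by len, reverse, relying on stability) with a hand-rolled recursive combinations function and a bucket grouping: results are grouped by dict size as they are produced and the buckets are emitted largest size first.
import Mathlib
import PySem

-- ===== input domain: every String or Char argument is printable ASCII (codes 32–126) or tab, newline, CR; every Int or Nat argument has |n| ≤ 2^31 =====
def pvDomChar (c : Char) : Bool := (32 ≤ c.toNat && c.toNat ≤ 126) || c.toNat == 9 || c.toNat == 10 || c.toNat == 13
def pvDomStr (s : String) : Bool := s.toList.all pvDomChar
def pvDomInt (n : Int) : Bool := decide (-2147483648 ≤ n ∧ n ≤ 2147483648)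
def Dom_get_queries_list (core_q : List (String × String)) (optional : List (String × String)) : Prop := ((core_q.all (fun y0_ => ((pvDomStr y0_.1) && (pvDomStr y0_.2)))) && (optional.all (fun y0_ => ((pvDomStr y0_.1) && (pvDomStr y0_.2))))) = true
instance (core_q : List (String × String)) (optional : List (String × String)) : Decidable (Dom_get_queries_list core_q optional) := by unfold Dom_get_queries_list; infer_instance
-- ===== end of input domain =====

-- B replaces A's final stable length-sort of the powerset by bucket grouping: dicts are grouped by
-- size as they are generated (hand-rolled recursive combinations) and the buckets are emitted
-- largest size first (alternative algorithm; equivalence of the RETURN value proved for all inputs).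

-- ===== PORT A =====
-- 'q[n] = optional[n]': n is always a key of optional (it comes from combinations over the dict),
-- so the getD default "" is never used.
def get_queries_list (core_q : List (String × String)) (optional : List (String × String)) : List (List (String × String)) :=
  let od := PySem.Dict.ofList optional
  let cd := PySem.Dict.ofList core_q
  let qlist : List (PySem.Dict String String) :=
    (PySem.List.pyRange 1 ((od.size : Int) + 1) 1).foldl (fun acc i =>
      (PySem.List.combinations od.keys i.toNat).foldl (fun acc c =>
        acc ++ [c.foldl (fun q n => q.insert n (od.getD n "")) cd]) acc) []
  (PySem.List.sorted qlist (fun q => q.size) true).map (fun q => q.items)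

-- ===== PORT B =====
-- _combos from Source B, structural recursion on (r, xs)
def pvCombosB (xs : List String) (r : Nat) : List (List String) :=
  match r, xs with
  | 0, _ => [[]]
  | _ + 1, [] => []
  | r + 1, first :: rest =>
      (pvCombosB rest r).map (fun c => first :: c) ++ pvCombosB rest (r + 1)
termination_by (r, xs)

-- 'optional[k]': k is a key of optional, 'buckets[size]': size is a key of buckets,
-- so the getD defaults are never used.
def get_queries_list_alt (core_q : List (String × String)) (optional : List (String × String)) : List (List (String × String)) :=
  let od := PySem.Dict.ofList optional
  let cd := PySem.Dict.ofList core_q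
  let keys := od.keys
  let buckets : PySem.Dict Int (List (PySem.Dict String String)) :=
    (PySem.List.pyRange 1 ((keys.length : Int) + 1) 1).foldl (fun b r =>
      (pvCombosB keys r.toNat).foldl (fun b ks =>
        let q := ks.foldl (fun q k => q.insert k (od.getD k "")) cd
        b.modify ((q.size : Int)) [] (· ++ [q])) b) PySem.Dict.empty
  ((PySem.List.sorted buckets.keys (fun k => k) true).foldl
      (fun out s => out ++ buckets.getD s []) []).map (fun q => q.items)

-- ===== PRECONDITION & SPEC =====
def Spec_get_queries_list (core_q : List (String × String)) (optional : List (String × String)) (out : List (List (String × String))) : Prop := out = get_queries_list_alt core_q optional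
instance (core_q : List (String × String)) (optional : List (String × String)) (out : List (List (String × String))) : Decidable (Spec_get_queries_list core_q optional out) := by unfold Spec_get_queries_list; infer_instance

-- ===== CLAIM (what is proved, stated in full; the proofs are below) =====
def Claim_equal_get_queries_list : Prop := ∀ (core_q : List (String × String)) (optional : List (String × String)), Dom_get_queries_list core_q optional → Spec_get_queries_list core_q optional (get_queries_list core_q optional)

-- ===== LEMMAS AND PROOFS =====

-- Source B's recursive _combos computes itertools.combinations
theorem pvCombosB_eq (xs : List String) (r : Nat) :
    pvCombosB xs r = PySem.List.combinations xs r := by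
  induction xs generalizing r with
  | nil =>
    cases r with
    | zero => simp [pvCombosB, PySem.List.combinations_zero]
    | succ r => simp [pvCombosB, PySem.List.combinations_nil_succ]
  | cons x rest ih =>
    cases r with
    | zero => simp [pvCombosB, PySem.List.combinations_zero]
    | succ r =>
      rw [PySem.List.combinations_cons_succ]
      simp [pvCombosB, ih]

-- insertBy only looks at `before x y` for y in the list
theorem pvInsertBy_congr {α : Type} (b1 b2 : α → α → Bool) (x : α) (ys : List α)
    (h : ∀ y ∈ ys, b1 x y = b2 x y) :
    PySem.List.insertBy b1 x ys = PySem.List.insertBy b2 x ys := by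
  induction ys with
  | nil => rfl
  | cons y ys ih =>
    simp only [PySem.List.insertBy]
    rw [h y (by simp)]
    split
    · rfl
    · rw [ih (fun z hz => h z (by simp [hz]))]

-- insertBy commutes with map when the comparator factors through the map
theorem pvInsertBy_map {α β : Type} (f : α → β) (before : β → β → Bool) (x : α) (ys : List α) :
    PySem.List.insertBy before (f x) (ys.map f)
      = (PySem.List.insertBy (fun a b => before (f a) (f b)) x ys).map f := by
  induction ys with
  | nil => rfl
  | cons y ys ih =>
    simp only [List.map_cons, PySem.List.insertBy]
    split
    · simp
    · simp [ih]

theorem pvSorted_map_comm_aux {α β κ : Type} [LT κ] [DecidableLT κ] (f : α → β) (key : β → κ)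
    (cmp : κ → κ → Bool) (xs : List α) (acc : List α) :
    List.foldl (fun acc x => PySem.List.insertBy (fun a b => cmp (key a) (key b)) x acc)
      (acc.map f) (xs.map f)
      = (List.foldl (fun acc x => PySem.List.insertBy (fun a b => cmp (key (f a)) (key (f b))) x acc) acc xs).map f := by
  induction xs generalizing acc with
  | nil => rfl
  | cons x xs ih =>
    simp only [List.map_cons, List.foldl_cons]
    rw [pvInsertBy_map f (fun a b => cmp (key a) (key b)) x acc, ih]

-- a stable sort commutes with a decoration map
theorem pvSorted_map_comm {α β κ : Type} [LT κ] [DecidableLT κ] (f : α → β) (key : β → κ)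
    (rev : Bool) (xs : List α) :
    PySem.List.sorted (xs.map f) key rev
      = (PySem.List.sorted xs (fun a => key (f a)) rev).map f := by
  cases rev
  · rw [PySem.List.sorted_eq_foldl_insertBy, PySem.List.sorted_eq_foldl_insertBy]
    exact pvSorted_map_comm_aux f key (fun a b => decide (a < b)) xs []
  · rw [PySem.List.sorted_rev_eq_foldl_insertBy, PySem.List.sorted_rev_eq_foldl_insertBy]
    exact pvSorted_map_comm_aux f key (fun a b => decide (b < a)) xs []

theorem pvRev_to_lex_aux {α : Type} (klen : α → Nat) (s : α → List Int) (xs : List α)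
    (acc : List α) (hacc : ∀ y ∈ acc, ∀ x ∈ xs, s y < s x)
    (h : xs.Pairwise (fun a b => s a < s b)) :
    List.foldl (fun acc x => PySem.List.insertBy (fun a b => decide (klen b < klen a)) x acc) acc xs
      = List.foldl (fun acc x => PySem.List.insertBy
          (fun a b => decide (((-(klen a : Int)) :: s a) < ((-(klen b : Int)) :: s b))) x acc) acc xs := by
  induction xs generalizing acc with
  | nil => rfl
  | cons x xs ih =>
    simp only [List.foldl_cons]
    have hcmp : PySem.List.insertBy (fun a b => decide (klen b < klen a)) x acc
        = PySem.List.insertBy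
          (fun a b => decide (((-(klen a : Int)) :: s a) < ((-(klen b : Int)) :: s b))) x acc := by
      apply pvInsertBy_congr
      intro y hy
      have hsy : s y < s x := hacc y hy x (by simp)
      have hns : ¬ s x < s y := lt_asymm hsy
      simp only [decide_eq_decide, List.cons_lt_cons_iff]
      constructor
      · intro hlt; left; omega
      · rintro (hlt | ⟨heq, hlt⟩)
        · omega
        · exact absurd hlt hns
    rw [hcmp]
    apply ih
    · intro y hy z hz
      rcases (PySem.List.mem_insertBy _ x y acc).mp hy with rfl | hy'
      · exact (List.pairwise_cons.mp h).1 z hz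
      · exact lt_trans (hacc y hy' x (by simp)) ((List.pairwise_cons.mp h).1 z hz)
    · exact (List.pairwise_cons.mp h).2

-- a stable reverse sort of a list already strictly ordered by a secondary key equals the
-- plain sort by the lexicographic key (negated primary, then the secondary key)
theorem pvRev_to_lex {α : Type} (klen : α → Nat) (s : α → List Int) (xs : List α)
    (h : xs.Pairwise (fun a b => s a < s b)) :
    PySem.List.sorted xs klen true
      = PySem.List.sorted xs (fun a => (-(klen a : Int)) :: s a) false := by
  rw [PySem.List.sorted_rev_eq_foldl_insertBy, PySem.List.sorted_eq_foldl_insertBy]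
  exact pvRev_to_lex_aux klen s xs [] (by simp) h

theorem pvSorted_LO {α : Type} (xs : List α) (key : α → List Int) (rev : Bool) :
    PySem.List.sorted xs key rev
      = @PySem.List.sorted α (List Int) _ (@LinearOrder.toDecidableLT _ List.instLinearOrder) xs key rev := by
  have hinst : (fun (a b : List Int) => a.decidableLT b)
      = (@LinearOrder.toDecidableLT (List Int) List.instLinearOrder) := by
    funext a b; exact Subsingleton.elim _ _
  rw [hinst]

-- proof-side abbreviations for the two programs' common data
def pvBuild (core_q optional : List (String × String)) (ks : List String) : PySem.Dict String String :=
  ks.foldl (fun q k => q.insert k ((PySem.Dict.ofList optional).getD k "")) (PySem.Dict.ofList core_q)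
def pvQ (core_q optional : List (String × String)) : List (PySem.Dict String String) :=
  ((PySem.List.pyRange 1 (((PySem.Dict.ofList optional).keys.length : Int) + 1) 1).flatMap
      (fun i => PySem.List.combinations (PySem.Dict.ofList optional).keys i.toNat)).map
    (pvBuild core_q optional)
def pvGrp (l : List (PySem.Dict String String)) : PySem.Dict Int (List (PySem.Dict String String)) :=
  l.foldl (fun b q => b.modify ((q.size : Int)) [] (· ++ [q])) PySem.Dict.empty
def pvK (l : List (PySem.Dict String String)) : List Int :=
  PySem.List.sorted (pvGrp l).keys (fun k => k) true
def pvE (l : List (PySem.Dict String String)) : List (Int × PySem.Dict String String) :=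
  PySem.List.enumerate l 0
def pvLex (p : Int × PySem.Dict String String) : List Int := (-(p.2.size : Int)) :: [p.1]
def pvOutE (l : List (PySem.Dict String String)) : List (Int × PySem.Dict String String) :=
  (pvK l).flatMap (fun s => (pvE l).filter (fun p => ((p.2.size : Int) == s)))

theorem pvFoldl_flatMap {α β γ : Type} (g : α → List β) (f : γ → β → γ) (l : List α) (init : γ) :
    l.foldl (fun b x => (g x).foldl f b) init = (l.flatMap g).foldl f init := by
  induction l generalizing init with
  | nil => rfl
  | cons x l ih => simp [List.foldl_append, ih]

-- A computes the stable reverse length-sort of pvQ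
theorem pvA_eq (core_q optional : List (String × String)) :
    get_queries_list core_q optional
      = (PySem.List.sorted (pvQ core_q optional) (fun q => q.size) true).map (fun q => q.items) := by
  simp only [get_queries_list]
  have hsize : ((PySem.Dict.ofList optional).size : Int)
      = (((PySem.Dict.ofList optional).keys.length : Int)) := by
    simp [PySem.Dict.keys, PySem.Dict.size]
  rw [hsize]
  congr 1
  congr 1
  simp only [PySem.List.foldl_append_singleton_eq_map, PySem.List.foldl_append_eq_flatMap,
    List.nil_append]
  rw [pvQ, List.map_flatMap]
  rfl

-- B's bucket dictionary is the grouping fold over pvQ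
theorem pvB_eq (core_q optional : List (String × String)) :
    get_queries_list_alt core_q optional
      = ((pvK (pvQ core_q optional)).foldl
            (fun out s => out ++ (pvGrp (pvQ core_q optional)).getD s []) []).map
          (fun q => q.items) := by
  simp only [get_queries_list_alt, pvCombosB_eq]
  have hb : (PySem.List.pyRange 1 ((((PySem.Dict.ofList optional).keys.length : Int)) + 1) 1).foldl
        (fun b r => (PySem.List.combinations (PySem.Dict.ofList optional).keys r.toNat).foldl
          (fun b ks =>
            b.modify (((ks.foldl (fun q k => q.insert k ((PySem.Dict.ofList optional).getD k ""))
                (PySem.Dict.ofList core_q)).size : Int)) []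
              (· ++ [ks.foldl (fun q k => q.insert k ((PySem.Dict.ofList optional).getD k ""))
                (PySem.Dict.ofList core_q)])) b) PySem.Dict.empty
      = pvGrp (pvQ core_q optional) := by
    rw [pvFoldl_flatMap, pvGrp, pvQ, List.foldl_map]
    rfl
  rw [hb, pvK]

-- the bucket lists are the size-filters of pvQ
theorem pvGetD_grp (l : List (PySem.Dict String String)) (s : Int) :
    (pvGrp l).getD s [] = l.filter (fun q => ((q.size : Int) == s)) := by
  have h : pvGrp l = (l.map (fun q => (((q.size : Int)), q))).foldl
      (fun d p => d.modify p.1 [] (· ++ [p.2])) PySem.Dict.empty := by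
    rw [List.foldl_map]; rfl
  rw [h, PySem.Dict.getD_foldl_modify_append, PySem.Dict.getD_empty, List.nil_append,
    List.filter_map]
  rw [List.map_map]
  simp [Function.comp_def]

-- the bucket keys are the distinct sizes
theorem pvKeys_grp (l : List (PySem.Dict String String)) :
    (pvGrp l).keys = PySem.Set.ofList (l.map (fun q => ((q.size : Int)))) := by
  rw [pvGrp, PySem.Dict.keys_foldl_modify_key]
  rw [PySem.Dict.keys_empty]
  rw [PySem.Set.ofList_eq_foldl]
  rfl

theorem pvK_nodup (l : List (PySem.Dict String String)) : (pvK l).Nodup := by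
  rw [pvK]
  exact (PySem.List.sorted_perm _ _ _).nodup_iff.mpr
    (by rw [pvKeys_grp]; exact PySem.Set.nodup_ofList _)

theorem pvK_mem (l : List (PySem.Dict String String)) (s : Int) :
    s ∈ pvK l ↔ s ∈ l.map (fun q => ((q.size : Int))) := by
  rw [pvK, PySem.List.mem_sorted, pvKeys_grp, PySem.Set.mem_ofList]

theorem pvK_sorted_gt (l : List (PySem.Dict String String)) :
    (pvK l).Pairwise (fun a b => b < a) := by
  have hle := PySem.List.sorted_pairwise_rev (pvGrp l).keys (fun k => k)
  have hnd : (pvK l).Pairwise (fun a b => a ≠ b) := (pvK_nodup l)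
  exact (hle.and hnd).imp (fun {a b} h => lt_of_le_of_ne h.1 (Ne.symm h.2))

theorem pvE_pairwise (l : List (PySem.Dict String String)) :
    (pvE l).Pairwise (fun p q => p.1 < q.1) := PySem.List.pairwise_lt_enumerate l 0

theorem pvE_nodup (l : List (PySem.Dict String String)) : (pvE l).Nodup :=
  (pvE_pairwise l).imp (fun {a b} h => by intro heq; rw [heq] at h; exact lt_irrefl _ h)

theorem pvE_snd_mem (l : List (PySem.Dict String String)) (p : Int × PySem.Dict String String)
    (hp : p ∈ pvE l) : p.2 ∈ l := by
  rcases (PySem.List.mem_enumerate_iff l 0 p).mp hp with ⟨k, hk, rfl⟩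
  exact List.getElem_mem hk

theorem pvFlatFilter_nodup (l : List (PySem.Dict String String)) (K : List Int) (hK : K.Nodup) :
    (K.flatMap (fun s => (pvE l).filter (fun p => ((p.2.size : Int) == s)))).Nodup := by
  induction K with
  | nil => simp
  | cons s K ih =>
    rcases List.nodup_cons.mp hK with ⟨hs, hK'⟩
    simp only [List.flatMap_cons]
    refine List.Nodup.append ((pvE_nodup l).filter _) (ih hK') ?_
    intro p hp1 hp2
    rcases List.mem_filter.mp hp1 with ⟨_, hps⟩
    rcases List.mem_flatMap.mp hp2 with ⟨s', hs', hp'⟩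
    rcases List.mem_filter.mp hp' with ⟨_, hps'⟩
    apply hs
    have h1 : (p.2.size : Int) = s := by simpa using hps
    have h2 : (p.2.size : Int) = s' := by simpa using hps'
    rwa [← h1, h2]

theorem pvOutE_nodup (l : List (PySem.Dict String String)) : (pvOutE l).Nodup :=
  pvFlatFilter_nodup l (pvK l) (pvK_nodup l)

theorem pvOutE_perm (l : List (PySem.Dict String String)) : (pvOutE l).Perm (pvE l) := by
  apply (List.perm_ext_iff_of_nodup (pvOutE_nodup l) (pvE_nodup l)).mpr
  intro p
  constructor
  · intro hp
    rcases List.mem_flatMap.mp hp with ⟨s, _, hps⟩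
    exact (List.mem_filter.mp hps).1
  · intro hp
    apply List.mem_flatMap.mpr
    refine ⟨(p.2.size : Int), ?_, List.mem_filter.mpr ⟨hp, by simp⟩⟩
    exact (pvK_mem l _).mpr (List.mem_map.mpr ⟨p.2, pvE_snd_mem l p hp, rfl⟩)

theorem pvFlatFilter_pairwise (l : List (PySem.Dict String String)) (K : List Int)
    (hK : K.Pairwise (fun a b => b < a)) :
    (K.flatMap (fun s => (pvE l).filter (fun p => ((p.2.size : Int) == s)))).Pairwise
      (fun p q => pvLex p < pvLex q) := by
  induction K with
  | nil => simp
  | cons s K ih =>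
    rcases List.pairwise_cons.mp hK with ⟨hs, hK'⟩
    simp only [List.flatMap_cons]
    apply List.pairwise_append.mpr
    refine ⟨?_, ih hK', ?_⟩
    · apply List.Pairwise.imp_of_mem ?_ ((pvE_pairwise l).filter _)
      intro p q hp hq hlt
      have h1 : (p.2.size : Int) = s := by simpa using (List.mem_filter.mp hp).2
      have h2 : (q.2.size : Int) = s := by simpa using (List.mem_filter.mp hq).2
      rw [pvLex, pvLex, h1, h2]
      exact List.cons_lt_cons_iff.mpr (Or.inr ⟨rfl,
        List.cons_lt_cons_iff.mpr (Or.inl hlt)⟩)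
    · intro p hp q hq
      have h1 : (p.2.size : Int) = s := by simpa using (List.mem_filter.mp hp).2
      rcases List.mem_flatMap.mp hq with ⟨s', hs', hq'⟩
      have h2 : (q.2.size : Int) = s' := by simpa using (List.mem_filter.mp hq').2
      have : s' < s := hs s' hs'
      rw [pvLex, pvLex, h1, h2]
      exact List.cons_lt_cons_iff.mpr (Or.inl (by omega))

theorem pvOutE_pairwise (l : List (PySem.Dict String String)) :
    (pvOutE l).Pairwise (fun p q => pvLex p < pvLex q) :=
  pvFlatFilter_pairwise l (pvK l) (pvK_sorted_gt l)

-- the bucket output IS the stable reverse size-sort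
theorem pvBucket_sort (l : List (PySem.Dict String String)) :
    PySem.List.sorted l (fun q => q.size) true = (pvOutE l).map (fun p => p.2) := by
  have hl : l = (pvE l).map (fun p => p.2) := (PySem.List.map_snd_enumerate l 0).symm
  calc PySem.List.sorted l (fun q => q.size) true
      = PySem.List.sorted ((pvE l).map (fun p => p.2)) (fun q => q.size) true := by rw [← hl]
    _ = (PySem.List.sorted (pvE l) (fun p => p.2.size) true).map (fun p => p.2) := by
        rw [pvSorted_map_comm]
    _ = (PySem.List.sorted (pvE l) pvLex false).map (fun p => p.2) := by
        rw [pvRev_to_lex (fun p => p.2.size) (fun p => [p.1]) (pvE l)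
          ((pvE_pairwise l).imp (fun {a b} h =>
            List.cons_lt_cons_iff.mpr (Or.inl h)))]
        rfl
    _ = (pvOutE l).map (fun p => p.2) := by
        rw [pvSorted_LO]
        exact congrArg _ (PySem.List.sorted_eq_of_perm_of_pairwise_lt (pvE l) (pvOutE l) pvLex
          (pvOutE_perm l) (pvOutE_pairwise l))

theorem get_queries_list_spec_aux (core_q optional : List (String × String)) :
    get_queries_list core_q optional = get_queries_list_alt core_q optional := by
  rw [pvA_eq, pvB_eq]
  congr 1
  rw [pvBucket_sort, PySem.List.foldl_append_eq_flatMap, List.nil_append, pvOutE,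
    List.map_flatMap]
  congr 1
  funext s
  rw [pvGetD_grp]
  conv_rhs => rw [← PySem.List.map_snd_enumerate (pvQ core_q optional) 0]
  rw [List.filter_map]
  rfl

-- ===== VERDICT (by name: the statement is the Claim_ definition above) =====
theorem get_queries_list_spec : Claim_equal_get_queries_list := by
  intro core_q optional _
  unfold Spec_get_queries_list
  exact get_queries_list_spec_aux core_q optional
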